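-- pv_equiv track=rewrite | github.com/GioTro/Competative_Programming_Solutions | Kattis/Python/sumkindofproblem.py | solve
-- ===== SOURCE A (Python) =====
-- def solve(n):
-- 	s1, s2, s3, i = 0, 0, 0, 1
--
-- 	while (True):
-- 		if (i <= n):
-- 			s1 += i
-- 		if (i % 2 == 1 and i <= 2*n):
-- 			s2 += i
-- 		if (i % 2 == 0 and i <= 2*n):
-- 			s3 += i
-- 		if (i > 2*n):
-- 			break
-- 		i += 1
-- 	return [s1, s2, s3]
-- ===== SOURCE B (Python) =====
-- def solve(n):
--     m = n if n > 0 else 0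
--     return [m * (m + 1) // 2, m * m, m * (m + 1)]
-- ===== Notes on version B (the rewrite author's own statement) =====
-- stated objective: faster
-- what changed: Replaces the O(n) counting loop with the closed-form sums n(n+1)/2, n^2 and n(n+1) (clamped at 0 for non-positive n).
import Mathlib
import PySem

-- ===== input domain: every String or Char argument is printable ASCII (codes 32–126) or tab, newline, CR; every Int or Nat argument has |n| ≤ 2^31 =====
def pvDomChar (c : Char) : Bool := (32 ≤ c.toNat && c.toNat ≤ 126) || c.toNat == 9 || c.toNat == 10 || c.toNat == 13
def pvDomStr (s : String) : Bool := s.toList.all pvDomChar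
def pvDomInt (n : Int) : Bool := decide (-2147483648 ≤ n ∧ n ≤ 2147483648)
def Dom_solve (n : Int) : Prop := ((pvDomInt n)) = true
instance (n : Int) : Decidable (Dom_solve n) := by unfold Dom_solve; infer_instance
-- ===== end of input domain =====

-- B replaces A's O(n) counting loop with the closed-form sums n(n+1)/2, n^2, n(n+1) (clamped at 0 for non-positive n).


-- ===== PORT A =====
-- the while-True loop of A: update the three sums, break when i > 2n, else i += 1
def loopA (n s1 s2 s3 i : Int) : List Int :=
  let s1' := if i ≤ n then s1 + i else s1
  let s2' := if PySem.Int.mod i 2 = 1 ∧ i ≤ 2 * n then s2 + i else s2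
  let s3' := if PySem.Int.mod i 2 = 0 ∧ i ≤ 2 * n then s3 + i else s3
  if 2 * n < i then [s1', s2', s3']
  else loopA n s1' s2' s3' (i + 1)
termination_by (2 * n + 1 - i).toNat
decreasing_by omega

def solve (n : Int) : List Int := loopA n 0 0 0 1

-- ===== PORT B =====
def solve_alt (n : Int) : List Int :=
  let m := if 0 < n then n else 0
  [PySem.Int.floordiv (m * (m + 1)) 2, m * m, m * (m + 1)]

-- ===== PRECONDITION & SPEC =====
def Spec_solve (n : Int) (out : List Int) : Prop := out = solve_alt n
instance (n : Int) (out : List Int) : Decidable (Spec_solve n out) := by unfold Spec_solve; infer_instance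

-- ===== CLAIM (what is proved, stated in full; the proofs are below) =====
def Claim_equal_solve : Prop := ∀ (n : Int), Dom_solve n → Spec_solve n (solve n)

-- ===== LEMMAS AND PROOFS =====

-- remaining contributions of the loop from position i on (closed forms)
def O1 (n i : Int) : Int := if i ≤ n then (n * (n + 1) - (i - 1) * i) / 2 else 0
def O2 (n i : Int) : Int := n * n - (i / 2) * (i / 2)
def O3 (n i : Int) : Int := n * (n + 1) - ((i - 1) / 2) * ((i - 1) / 2 + 1)

lemma mod_two (i : Int) : PySem.Int.mod i 2 = i % 2 :=
  PySem.Int.mod_eq_emod_of_pos (by omega)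

lemma O1_step (n i : Int) (_h1 : 1 ≤ i) (h2 : i ≤ 2 * n) :
    O1 n i = (if i ≤ n then i else 0) + O1 n (i + 1) := by
  unfold O1
  rcases Int.even_mul_succ_self n with ⟨p, hp⟩
  rcases Int.even_mul_succ_self i with ⟨q, hq⟩
  rcases Int.even_mul_succ_self (i - 1) with ⟨r, hr⟩
  have hq' : i * (i + 1) = 2 * q := by omega
  have hr' : (i - 1) * i = 2 * r := by nlinarith [hq, hr]
  have hp' : n * (n + 1) = 2 * p := by omega
  have hrq : r = q - i := by nlinarith [hq', hr']
  by_cases hin : i ≤ n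
  · by_cases hin' : i + 1 ≤ n
    · simp only [if_pos hin, if_pos hin']
      have : (i + 1 - 1) * (i + 1) = 2 * q := by linarith [hq']
      rw [hp', hr', this]
      omega
    · have hin2 : i = n := by omega
      simp only [if_pos hin, if_neg hin']
      subst hin2
      have : i * (i + 1) - (i - 1) * i = 2 * i := by ring
      omega
  · have : ¬ i + 1 ≤ n := by omega
    simp [hin, this]

lemma O2_step (n i : Int) (_h1 : 1 ≤ i) (_h2 : i ≤ 2 * n) :
    O2 n i = (if i % 2 = 1 then i else 0) + O2 n (i + 1) := by
  unfold O2
  rcases Int.even_or_odd i with ⟨k, hk⟩ | ⟨k, hk⟩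
  · have h0 : i % 2 = 0 := by omega
    have d1 : i / 2 = k := by omega
    have d2 : (i + 1) / 2 = k := by omega
    rw [h0, d1, d2]; norm_num
  · have h0 : i % 2 = 1 := by omega
    have d1 : i / 2 = k := by omega
    have d2 : (i + 1) / 2 = k + 1 := by omega
    rw [h0, d1, d2]; simp; ring_nf; nlinarith [hk]

lemma O3_step (n i : Int) (_h1 : 1 ≤ i) (_h2 : i ≤ 2 * n) :
    O3 n i = (if i % 2 = 0 then i else 0) + O3 n (i + 1) := by
  unfold O3
  rcases Int.even_or_odd i with ⟨k, hk⟩ | ⟨k, hk⟩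
  · have h0 : i % 2 = 0 := by omega
    have d1 : (i - 1) / 2 = k - 1 := by omega
    have d2 : (i + 1 - 1) / 2 = k := by omega
    rw [h0, d1, d2]; simp; nlinarith [hk]
  · have h0 : ¬ i % 2 = 0 := by omega
    have d1 : (i - 1) / 2 = k := by omega
    have d2 : (i + 1 - 1) / 2 = k := by omega
    rw [d1, d2]; simp [h0]

lemma loopA_eq (n : Int) : ∀ (k : Nat) (i s1 s2 s3 : Int), (2 * n + 1 - i).toNat = k →
    1 ≤ i → i ≤ 2 * n + 1 →
    loopA n s1 s2 s3 i = [s1 + O1 n i, s2 + O2 n i, s3 + O3 n i] := by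
  intro k
  induction k using Nat.strong_induction_on with
  | _ k ih =>
    intro i s1 s2 s3 hk h1 h2
    rw [loopA]
    by_cases hc : 2 * n < i
    · have hi : i = 2 * n + 1 := by omega
      have hn : 0 ≤ n := by omega
      have hx1 : ¬ i ≤ n := by omega
      have hx2 : ¬ i ≤ 2 * n := by omega
      simp only [if_pos hc, hx1, hx2, and_false, if_false]
      have e1 : O1 n i = 0 := by unfold O1; simp [hx1]
      have e2 : O2 n i = 0 := by
        unfold O2
        have : i / 2 = n := by omega
        rw [this]; ring
      have e3 : O3 n i = 0 := by
        unfold O3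
        have : (i - 1) / 2 = n := by omega
        rw [this]; ring
      rw [e1, e2, e3]; simp
    · have h2' : i ≤ 2 * n := by omega
      simp only [if_neg hc]
      rw [ih (2 * n + 1 - (i + 1)).toNat (by omega) (i + 1) _ _ _ rfl (by omega) (by omega)]
      rw [O1_step n i h1 h2', O2_step n i h1 h2', O3_step n i h1 h2', mod_two]
      have e1 : (if i ≤ n then s1 + i else s1) + O1 n (i + 1)
          = s1 + ((if i ≤ n then i else 0) + O1 n (i + 1)) := by split_ifs <;> ring
      have e2 : (if i % 2 = 1 ∧ i ≤ 2 * n then s2 + i else s2) + O2 n (i + 1)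
          = s2 + ((if i % 2 = 1 then i else 0) + O2 n (i + 1)) := by
        split_ifs <;> simp_all <;> ring
      have e3 : (if i % 2 = 0 ∧ i ≤ 2 * n then s3 + i else s3) + O3 n (i + 1)
          = s3 + ((if i % 2 = 0 then i else 0) + O3 n (i + 1)) := by
        split_ifs <;> simp_all <;> ring
      rw [e1, e2, e3]

lemma floordiv_two (a : Int) : PySem.Int.floordiv a 2 = a / 2 :=
  PySem.Int.floordiv_eq_ediv_of_pos (by omega)

-- ===== VERDICT (by name: the statement is the Claim_ definition above) =====
theorem solve_spec : Claim_equal_solve := by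
  intro n _
  unfold Spec_solve solve solve_alt
  by_cases hn : 0 < n
  · rw [loopA_eq n (2 * n).toNat 1 0 0 0 (by omega) (by omega) (by omega)]
    simp only [if_pos hn, floordiv_two]
    unfold O1 O2 O3
    simp only [if_pos (show (1 : Int) ≤ n by omega)]
    norm_num
  · rw [loopA]
    have hx1 : ¬ (1 : Int) ≤ n := by omega
    have hc : 2 * n < 1 := by omega
    have hx2 : ¬ (1 : Int) ≤ 2 * n := by omega
    simp only [if_pos hc, hx1, hx2, and_false, if_false, if_neg hn]
    norm_num [PySem.Int.floordiv]
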